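-- pv_equiv track=rewrite | github.com/pulkitsingla33/advent-of-code-2025 | Day3/day3_part1.py | get_max_digit_and_pos
-- ===== SOURCE A (Python) =====
-- def get_max_digit_and_pos(number):
--     max_digit = 0
--     max_digit_pos = 0
--     for i in range(len(str(number))):
--         if(int(str(number)[i]) > max_digit):
--             max_digit = int(str(number)[i])
--             max_digit_pos = i
--
--     return max_digit, max_digit_pos
-- ===== SOURCE B (Python) =====
-- def get_max_digit_and_pos(number):
--     digits = [int(c) for c in str(number)]
--     max_digit = max(digits)
--     return max_digit, digits.index(max_digit)
-- ===== Notes on version B (the rewrite author's own statement) =====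
-- stated objective: simpler
-- what changed: Replaces A's single index-tracking loop with repeated str() calls by a digit-list comprehension followed by the builtins max() and list.index() (a reduction pass plus a search pass).
import Mathlib
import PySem

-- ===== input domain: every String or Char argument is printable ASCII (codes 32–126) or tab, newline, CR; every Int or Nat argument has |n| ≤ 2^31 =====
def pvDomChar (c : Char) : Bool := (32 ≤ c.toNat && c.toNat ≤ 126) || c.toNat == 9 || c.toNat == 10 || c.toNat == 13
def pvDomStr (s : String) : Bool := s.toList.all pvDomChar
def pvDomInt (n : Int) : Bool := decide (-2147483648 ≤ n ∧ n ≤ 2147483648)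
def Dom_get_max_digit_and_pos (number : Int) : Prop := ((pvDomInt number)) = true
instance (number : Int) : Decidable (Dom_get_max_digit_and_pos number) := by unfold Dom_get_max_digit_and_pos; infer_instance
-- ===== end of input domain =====

-- B replaces A's index-tracking loop (which rebuilds str(number) each iteration) by a digit-list
-- comprehension plus the builtins max() and list.index(): simpler, two builtin passes instead of one manual loop.


-- ===== PORT A =====
-- literal port of A: for i in range(len(str(number))): if int(str(number)[i]) > max_digit: update.
-- int(c) is PySem.Int.ofStr?; it is none (ValueError) on '-' — those inputs are excluded by Pre_ below,
-- so the .getD defaults are never reached inside Pre_.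
def get_max_digit_and_pos (number : Int) : Int × Int :=
  (PySem.List.pyRange 0 (PySem.Str.len (PySem.Int.toStr number)) 1).foldl
    (fun st i =>
      let d : Int :=
        (PySem.Int.ofStr? (((PySem.Str.pyGet? (PySem.Int.toStr number) i).getD ' ').toString)).getD 0
      if d > st.1 then (d, i) else st)
    (0, 0)

-- ===== PORT B =====
-- literal port of B: digits = [int(c) for c in str(number)]; max(digits); digits.index(max).
-- max() on [] and .index miss raise in Python; unreachable inside Pre_, defaults via .getD.
def get_max_digit_and_pos_alt (number : Int) : Int × Int :=
  let digits : List Int :=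
    (PySem.Int.toStr number).toList.map (fun c => (PySem.Int.ofStr? c.toString).getD 0)
  let max_digit : Int := (PySem.List.max? digits (fun y => y)).getD 0
  (max_digit, ((PySem.List.index? digits max_digit).getD 0 : Nat))

-- ===== PRECONDITION & SPEC =====
-- Both A and B raise ValueError on negative numbers (int('-') fails on the sign character); Pre_ excludes exactly those.
def Pre_get_max_digit_and_pos (number : Int) : Prop := 0 ≤ number
instance (number : Int) : Decidable (Pre_get_max_digit_and_pos number) := by
  unfold Pre_get_max_digit_and_pos; infer_instance

def pvWitness_get_max_digit_and_pos : Int := 907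

def Spec_get_max_digit_and_pos (number : Int) (out : Int × Int) : Prop :=
  out = get_max_digit_and_pos_alt number
instance (number : Int) (out : Int × Int) : Decidable (Spec_get_max_digit_and_pos number out) := by
  unfold Spec_get_max_digit_and_pos; infer_instance

-- ===== CLAIM (what is proved, stated in full; the proofs are below) =====
def Claim_equal_get_max_digit_and_pos : Prop :=
  ∀ (number : Int), Dom_get_max_digit_and_pos number → Pre_get_max_digit_and_pos number →
    Spec_get_max_digit_and_pos number (get_max_digit_and_pos number)

-- ===== LEMMAS AND PROOFS =====

-- the ten decimal digit characters
def pvDigits : List Char := ['0','1','2','3','4','5','6','7','8','9']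

-- int() of a one-character string, as both ports compute it
def pvDig (c : Char) : Int := (PySem.Int.ofStr? c.toString).getD 0

theorem pvDig_eta : (fun c => (PySem.Int.ofStr? c.toString).getD 0) = pvDig := rfl

theorem pvDig_bounds : ∀ c ∈ pvDigits, 0 ≤ pvDig c := by
  intro c hc
  fin_cases hc <;> decide

-- A's loop, restructured as structural recursion over the remaining characters
def pvLoop : List Char → Int → (Int × Int) → Int × Int
  | [], _, st => st
  | c :: t, k, st =>
      pvLoop t (k + 1) (if pvDig c > st.1 then (pvDig c, k) else st)

theorem pvDigitChar_mem : ∀ m : Nat, m < 10 → Nat.digitChar m ∈ pvDigits := by decide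

theorem pvToDigitsCore_mem : ∀ (f n : Nat) (ds : List Char),
    (∀ c ∈ ds, c ∈ pvDigits) → ∀ c ∈ Nat.toDigitsCore 10 f n ds, c ∈ pvDigits := by
  intro f
  induction f with
  | zero => intro n ds h; simpa [Nat.toDigitsCore] using h
  | succ f ih =>
      intro n ds h
      rw [Nat.toDigitsCore]
      have hd : Nat.digitChar (n % 10) ∈ pvDigits :=
        pvDigitChar_mem _ (Nat.mod_lt _ (by norm_num))
      split
      · intro c hc
        rcases List.mem_cons.mp hc with rfl | hc
        · exact hd
        · exact h c hc
      · exact ih _ _ (by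
          intro c hc
          rcases List.mem_cons.mp hc with rfl | hc
          · exact hd
          · exact h c hc)

theorem pvToDigitsCore_ne_nil' : ∀ (f n : Nat) (ds : List Char),
    ds ≠ [] → Nat.toDigitsCore 10 f n ds ≠ [] := by
  intro f
  induction f with
  | zero => intro n ds h; simpa [Nat.toDigitsCore] using h
  | succ f ih =>
      intro n ds h
      rw [Nat.toDigitsCore]
      split
      · simp
      · exact ih _ _ (by simp)

theorem pvToDigits_ne_nil (n : Nat) : Nat.toDigits 10 n ≠ [] := by
  rw [Nat.toDigits, Nat.toDigitsCore]
  split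
  · simp
  · exact pvToDigitsCore_ne_nil' _ _ _ (by simp)

theorem pvToChars_digits (n : Int) (h : 0 ≤ n) :
    (∀ c ∈ PySem.Int.toChars n, c ∈ pvDigits) ∧ PySem.Int.toChars n ≠ [] := by
  have : PySem.Int.toChars n = Nat.toDigits 10 n.toNat := by
    simp [PySem.Int.toChars, not_lt.mpr h]
  rw [this]
  refine ⟨?_, pvToDigits_ne_nil _⟩
  exact pvToDigitsCore_mem _ _ _ (by simp)

-- A's foldl over pyRange indices equals pvLoop on the dropped suffix
theorem pvBridge (s : List Char) : ∀ (m k : Nat) (st : Int × Int), s.length - k = m →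
    (PySem.List.pyRange (k : Int) (s.length : Int)).foldl
      (fun st i =>
        let d : Int := (PySem.Int.ofStr? (((PySem.Chars.pyGet? s i).getD ' ').toString)).getD 0
        if d > st.1 then (d, i) else st) st
    = pvLoop (s.drop k) (k : Int) st := by
  intro m
  induction m with
  | zero =>
      intro k st hm
      have hk : s.length ≤ k := by omega
      have h1 : PySem.List.pyRange (k : Int) (s.length : Int) = [] := by
        simp [PySem.List.pyRange]; omega
      have h2 : s.drop k = [] := List.drop_eq_nil_of_le hk
      simp [h1, h2, pvLoop]
  | succ m ih =>
      intro k st hm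
      have hk : k < s.length := by omega
      have hcons : PySem.List.pyRange (k : Int) (s.length : Int)
          = (k : Int) :: PySem.List.pyRange ((k : Int) + 1) (s.length : Int) :=
        PySem.List.pyRange_one_cons (by exact_mod_cast hk)
      have hget : PySem.Chars.pyGet? s (k : Int) = some s[k] := by
        simp [PySem.Chars.pyGet?, PySem.List.pyGet?_natCast, List.getElem?_eq_getElem hk]
      have hdrop : s.drop k = s[k] :: s.drop (k + 1) := List.drop_eq_getElem_cons hk
      rw [hcons, List.foldl_cons, hdrop]
      simp only [hget, Option.getD_some]
      have hcast : ((k : Int) + 1) = ((k + 1 : Nat) : Int) := by push_cast; ring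
      rw [hcast, ih (k + 1) _ (by omega)]
      rfl

-- characterisation of pvLoop: running max and position of its first attainment
theorem pvLoop_spec : ∀ (cs : List Char) (k m p : Int), 0 ≤ m →
    (∀ c ∈ cs, c ∈ pvDigits) →
    pvLoop cs k (m, p)
      = ((cs.map pvDig).foldl max m,
         if m < (cs.map pvDig).foldl max m then
           k + (List.idxOf ((cs.map pvDig).foldl max m) (cs.map pvDig) : Int)
         else p) := by
  intro cs
  induction cs with
  | nil => intro k m p hm hcs; simp [pvLoop]
  | cons c t ih =>
      intro k m p hm hcs
      have hc : c ∈ pvDigits := hcs c (List.mem_cons_self ..)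
      have hd0 : 0 ≤ pvDig c := pvDig_bounds c hc
      have ht : ∀ x ∈ t, x ∈ pvDigits := fun x hx => hcs x (List.mem_cons_of_mem _ hx)
      simp only [List.map_cons, List.foldl_cons, pvLoop]
      by_cases hlt : m < pvDig c
      · rw [if_pos (show pvDig c > m from hlt)]
        rw [ih (k + 1) (pvDig c) k hd0 ht]
        rw [max_eq_right (le_of_lt hlt)]
        have hdM : pvDig c ≤ (t.map pvDig).foldl max (pvDig c) :=
          (PySem.List.le_foldl_max _ _).1
        by_cases hdm : pvDig c = (t.map pvDig).foldl max (pvDig c)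
        · rw [if_neg (by omega), if_pos (by omega)]
          rw [List.idxOf_cons, show ((pvDig c == (t.map pvDig).foldl max (pvDig c))) = true by
            simp [← hdm]]
          simp
        · have hdM' : pvDig c < (t.map pvDig).foldl max (pvDig c) := lt_of_le_of_ne hdM hdm
          rw [if_pos hdM', if_pos (lt_trans hlt hdM')]
          rw [List.idxOf_cons, show ((pvDig c == (t.map pvDig).foldl max (pvDig c))) = false by
            simp [hdm]]
          simp only [cond_false]
          refine Prod.ext rfl ?_
          push_cast
          ring
      · rw [if_neg hlt]
        rw [ih (k + 1) m p hm ht]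
        rw [max_eq_left (not_lt.mp hlt)]
        by_cases hmM : m < (t.map pvDig).foldl max m
        · rw [if_pos hmM, if_pos hmM]
          have hdm : pvDig c ≠ (t.map pvDig).foldl max m :=
            ne_of_lt (lt_of_le_of_lt (not_lt.mp hlt) hmM)
          rw [List.idxOf_cons, show ((pvDig c == (t.map pvDig).foldl max m)) = false by
            simp [hdm]]
          simp only [cond_false]
          refine Prod.ext rfl ?_
          push_cast
          ring
        · rw [if_neg hmM, if_neg hmM]

-- idxOf? returns some idxOf on members
theorem pvIdxOf?_of_mem : ∀ (l : List Int) (v : Int), v ∈ l →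
    List.idxOf? v l = some (List.idxOf v l) := by
  intro l
  induction l with
  | nil => simp
  | cons a t ih =>
      intro v hv
      by_cases h : a = v
      · simp [List.idxOf?_cons, h]
      · have hvt : v ∈ t := by
          rcases List.mem_cons.mp hv with h' | h'
          · exact absurd h'.symm h
          · exact h'
        simp [List.idxOf?_cons, h, ih v hvt]

-- ===== VERDICT (by name: the statement is the Claim_ definition above) =====
theorem get_max_digit_and_pos_spec : Claim_equal_get_max_digit_and_pos := by
  intro number hdom hpre
  unfold Pre_get_max_digit_and_pos at hpre
  unfold Spec_get_max_digit_and_pos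
  obtain ⟨hmem, hne⟩ := pvToChars_digits number hpre
  have hA : get_max_digit_and_pos number = pvLoop (PySem.Int.toChars number) 0 (0, 0) := by
    unfold get_max_digit_and_pos
    simp only [PySem.Str.len_eq, PySem.Str.pyGet?_eq, PySem.Int.toList_toStr]
    have hb := pvBridge (PySem.Int.toChars number) (PySem.Int.toChars number).length 0 (0, 0)
      (by omega)
    simpa using hb
  rw [hA, pvLoop_spec (PySem.Int.toChars number) 0 0 0 le_rfl hmem]
  unfold get_max_digit_and_pos_alt
  simp only [PySem.Int.toList_toStr, pvDig_eta]
  obtain ⟨c, t, hct⟩ := List.exists_cons_of_ne_nil hne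
  rw [hct]
  simp only [List.map_cons, List.foldl_cons]
  rw [PySem.List.max?_id_cons]
  have hd0 : 0 ≤ pvDig c := pvDig_bounds c (hmem c (by rw [hct]; exact List.mem_cons_self ..))
  rw [max_eq_right hd0]
  have hMmem : (t.map pvDig).foldl max (pvDig c) ∈ pvDig c :: t.map pvDig := by
    rcases PySem.List.foldl_max_mem (t.map pvDig) (pvDig c) with h | h
    · rw [h]; exact List.mem_cons_self ..
    · exact List.mem_cons_of_mem _ h
  rw [PySem.List.index?_eq_idxOf?]
  simp only [Option.getD_some]
  rw [pvIdxOf?_of_mem _ _ hMmem]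
  simp only [Option.getD_some]
  by_cases hpos : 0 < (t.map pvDig).foldl max (pvDig c)
  · rw [if_pos hpos]
    refine Prod.ext rfl ?_
    simp
  · rw [if_neg hpos]
    have hdM : pvDig c ≤ (t.map pvDig).foldl max (pvDig c) := (PySem.List.le_foldl_max _ _).1
    have hM0 : (t.map pvDig).foldl max (pvDig c) = 0 := by omega
    have hd00 : pvDig c = 0 := by omega
    refine Prod.ext rfl ?_
    rw [List.idxOf_cons, show ((pvDig c == (t.map pvDig).foldl max (pvDig c))) = true by
      rw [beq_iff_eq, hM0, hd00]]
    simp
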